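-- pv_equiv track=rewrite | github.com/HasanCavdarr/bruteforce-wordlist | brute-force-wordlist.py | insert_special_characters
-- ===== SOURCE A (Python) =====
-- import string
--
-- def insert_special_characters(word):
--     special_chars = string.punctuation
--     variations = set()
--
--     # Kelimenin başına ve sonuna özel karakterler ekleyelim
--     for char in special_chars:
--         variations.add(char + word)
--         variations.add(word + char)
--
--     # Kelimenin arasına özel karakterler ekleyelim
--     for i in range(1, len(word)):
--         for char in special_chars:
--             variations.add(word[:i] + char + word[i:])
--
--     return variations
-- ===== SOURCE B (Python) =====
-- import string
--
-- def insert_special_characters(word):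
--     punct = string.punctuation
--
--     def ins(pre, u, suf):
--         # all strings pre + u' + suf where u' is u with one punctuation char
--         # inserted before one of its characters; divide and conquer on u
--         if not u:
--             return []
--         if len(u) == 1:
--             return [pre + c + u + suf for c in punct]
--         m = len(u) // 2
--         return ins(pre, u[:m], u[m:] + suf) + ins(pre + u[:m], u[m:], suf)
--
--     boundary = [x for c in punct for x in (c + word, word + c)]
--     return set(boundary + ins(word[:1], word[1:], ""))
-- ===== Notes on version B (the rewrite author's own statement) =====
-- stated objective: alternative
-- what changed: B replaces A's flat nested index loops by a divide-and-conquer recursion on the word (insertions into u = insertions into the left half carrying the right half as suffix, plus insertions into the right half carrying the left half as prefix), with the boundary insertions as one comprehension and a single final set() dedup instead of incremental set.add.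
import Mathlib
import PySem

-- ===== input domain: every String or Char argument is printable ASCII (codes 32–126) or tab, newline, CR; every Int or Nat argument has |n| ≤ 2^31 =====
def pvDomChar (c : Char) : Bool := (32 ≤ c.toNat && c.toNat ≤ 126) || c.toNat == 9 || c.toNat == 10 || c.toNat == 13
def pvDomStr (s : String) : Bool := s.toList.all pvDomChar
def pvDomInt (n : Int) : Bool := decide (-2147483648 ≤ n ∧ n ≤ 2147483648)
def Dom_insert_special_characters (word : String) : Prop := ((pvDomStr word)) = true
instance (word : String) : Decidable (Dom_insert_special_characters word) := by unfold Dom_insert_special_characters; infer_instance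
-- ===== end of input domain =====

-- B builds the internal insertions by divide-and-conquer recursion on the word instead of A's flat nested index loops, deduping once at the end; same return value.

-- string.punctuation (shared constant of both Pythons)
def pvPunct : List Char := ['!', '"', '#', '$', '%', '&', '\'', '(', ')', '*', '+', ',', '-', '.', '/', ':', ';', '<', '=', '>', '?', '@', '[', '\\', ']', '^', '_', '`', '{', '|', '}', '~']

-- ===== PORT A =====
def insert_special_characters (word : String) : List String :=
  let w := word.toList
  let variations : PySem.Set String := PySem.Set.empty
  -- for char in special_chars: variations.add(char+word); variations.add(word+char)
  let variations := pvPunct.foldl (fun s c =>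
      PySem.Set.add (PySem.Set.add s (String.mk (c :: w))) (String.mk (w ++ [c]))) variations
  -- for i in range(1, len(word)): for char: variations.add(word[:i]+char+word[i:])
  (PySem.List.pyRange 1 (w.length : Int) 1).foldl (fun s i =>
      pvPunct.foldl (fun s c =>
        PySem.Set.add s (String.mk (PySem.List.slice w none (some i) ++ c :: PySem.List.slice w (some i) none))) s)
    variations

-- ===== PORT B =====
-- ins(pre, u, suf): all strings pre + u' + suf, u' = u with one punctuation char inserted
-- before one of its characters; divide and conquer on u
def pvIns (pre u suf : List Char) : List String :=
  if u = [] then []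
  else if u.length = 1 then pvPunct.map (fun c => String.mk (pre ++ c :: (u ++ suf)))
  else
    let m := u.length / 2
    pvIns pre (u.take m) (u.drop m ++ suf) ++ pvIns (pre ++ u.take m) (u.drop m) suf
termination_by u.length
decreasing_by
  · have h1 : u.length ≥ 2 := by
      rcases u with _ | ⟨a, _ | ⟨b, t⟩⟩ <;> simp_all <;> omega
    simp only [List.length_take]
    omega
  · have h1 : u.length ≥ 2 := by
      rcases u with _ | ⟨a, _ | ⟨b, t⟩⟩ <;> simp_all <;> omega
    simp only [List.length_drop]
    omega

def insert_special_characters_alt (word : String) : List String :=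
  let w := word.toList
  let boundary := pvPunct.flatMap (fun c => [String.mk (c :: w), String.mk (w ++ [c])])
  PySem.Set.ofList (boundary ++ pvIns (w.take 1) (w.drop 1) [])

-- ===== PRECONDITION & SPEC =====
def Spec_insert_special_characters (word : String) (out : List String) : Prop := out = insert_special_characters_alt word
instance (word : String) (out : List String) : Decidable (Spec_insert_special_characters word out) := by unfold Spec_insert_special_characters; infer_instance

-- ===== CLAIM (what is proved, stated in full; the proofs are below) =====
def Claim_equal_insert_special_characters : Prop := ∀ (word : String), Dom_insert_special_characters word → Spec_insert_special_characters word (insert_special_characters word)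

-- ===== LEMMAS AND PROOFS =====

-- A's inner-loop body at position i, folded into set s
def pvInner (w : List Char) (s : PySem.Set String) (i : Int) : PySem.Set String :=
  pvPunct.foldl (fun s c =>
    PySem.Set.add s (String.mk (PySem.List.slice w none (some i) ++ c :: PySem.List.slice w (some i) none))) s

-- all insertions before each char of u, carrying pre/suf, position by position (proof-only)
def pvMidsS (pre u suf : List Char) : List String :=
  match u with
  | [] => []
  | s0 :: rest =>
      pvPunct.map (fun c => String.mk (pre ++ c :: (s0 :: rest) ++ suf)) ++ pvMidsS (pre ++ [s0]) rest suf

set_option maxHeartbeats 1000000 in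
theorem pvMidsS_spec (w : List Char) (i : Nat) (s : PySem.Set String) :
    (PySem.List.pyRange (i : Int) (w.length : Int) 1).foldl (pvInner w) s
      = (pvMidsS (w.take i) (w.drop i) []).foldl PySem.Set.add s := by
  by_cases h : w.length ≤ i
  · rw [PySem.List.pyRange_one_eq_nil (by exact_mod_cast h)]
    rw [List.drop_eq_nil_of_le h]
    rfl
  · push_neg at h
    rw [PySem.List.pyRange_one_cons (by exact_mod_cast h)]
    rw [List.drop_eq_getElem_cons h]
    simp only [pvMidsS, List.foldl_append, List.foldl_map, List.foldl_cons, List.append_nil,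
      List.cons_append]
    have hbase : pvInner w s (i : Int)
        = pvPunct.foldl (fun s c =>
            PySem.Set.add s (String.mk (w.take i ++ c :: (w[i] :: w.drop (i + 1))))) s := by
      simp only [pvInner, PySem.List.slice_to_natCast, PySem.List.slice_from_natCast,
        List.drop_eq_getElem_cons h]
    have hcast : ((i : Int) + 1) = ((i + 1 : Nat) : Int) := by push_cast; ring
    have htake : w.take i ++ [w[i]] = w.take (i + 1) := by
      rw [List.take_succ, List.getElem?_eq_getElem h]
      rfl
    rw [hbase, hcast, pvMidsS_spec w (i + 1), htake]
termination_by w.length - i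
decreasing_by omega

-- splitting the middle list splits pvMidsS
theorem pvMidsS_append (u1 u2 pre suf : List Char) :
    pvMidsS pre (u1 ++ u2) suf
      = pvMidsS pre u1 (u2 ++ suf) ++ pvMidsS (pre ++ u1) u2 suf := by
  induction u1 generalizing pre with
  | nil => simp [pvMidsS]
  | cons a t ih =>
      simp only [List.cons_append, pvMidsS, ih (pre ++ [a]), List.append_assoc]
      simp

-- pvIns computes pvMidsS
theorem pvIns_eq_midsS (pre u suf : List Char) : pvIns pre u suf = pvMidsS pre u suf := by
  by_cases h0 : u = []
  · subst h0; simp [pvIns, pvMidsS]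
  · by_cases h1 : u.length = 1
    · rcases u with _ | ⟨a, t⟩
      · simp at h0
      · have ht : t = [] := by simpa using h1
        subst ht
        rw [pvIns]
        simp [h1, pvMidsS]
    · rw [pvIns]
      rw [if_neg h0, if_neg h1]
      show pvIns pre (u.take (u.length / 2)) (u.drop (u.length / 2) ++ suf)
            ++ pvIns (pre ++ u.take (u.length / 2)) (u.drop (u.length / 2)) suf
          = pvMidsS pre u suf
      have hm : u.take (u.length / 2) ++ u.drop (u.length / 2) = u := List.take_append_drop _ u
      rw [pvIns_eq_midsS pre (u.take (u.length / 2)) (u.drop (u.length / 2) ++ suf),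
          pvIns_eq_midsS (pre ++ u.take (u.length / 2)) (u.drop (u.length / 2)) suf,
          ← pvMidsS_append, hm]
termination_by u.length
decreasing_by
  · have h2 : u.length ≥ 2 := by
      rcases u with _ | ⟨a, _ | ⟨b, t⟩⟩ <;> simp_all <;> omega
    simp only [List.length_take]; omega
  · have h2 : u.length ≥ 2 := by
      rcases u with _ | ⟨a, _ | ⟨b, t⟩⟩ <;> simp_all <;> omega
    simp only [List.length_drop]; omega

theorem pvFlat_spec (w : List Char) (ps : List Char) (s : PySem.Set String) :
    (ps.flatMap (fun c => [String.mk (c :: w), String.mk (w ++ [c])])).foldl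
        PySem.Set.add s
      = ps.foldl (fun s c =>
          PySem.Set.add (PySem.Set.add s (String.mk (c :: w))) (String.mk (w ++ [c])))
          s := by
  induction ps generalizing s with
  | nil => rfl
  | cons c cs ih => simp only [List.flatMap_cons, List.foldl_append, List.foldl_cons,
      List.foldl_nil, ih]

-- ===== VERDICT (by name: the statement is the Claim_ definition above) =====
theorem insert_special_characters_spec : Claim_equal_insert_special_characters := by
  intro word _
  unfold Spec_insert_special_characters insert_special_characters insert_special_characters_alt
  have h2 := pvMidsS_spec word.toList 1
  rw [Nat.cast_one] at h2
  show (PySem.List.pyRange 1 _ 1).foldl (pvInner word.toList) _ = _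
  rw [h2, PySem.Set.ofList_eq_foldl, List.foldl_append, pvFlat_spec, pvIns_eq_midsS]
  rfl
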